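-- pv_equiv track=rewrite | github.com/monsegard/portfolio | IM/кудряшов/Кр2/шифры/caesar.py | cfb_decrypt
-- ===== SOURCE A (Python) =====
-- def encrypt(c, key, l):
--     return (c + key) % l
--
-- def cfb_decrypt(data, key, iv, l=256):
--     cypher_data = []
--     for m in data:
--         c = encrypt(iv, key, l)
--         iv = m
--         c = c ^ iv
--         cypher_data.append(c)
--     return cypher_data
-- ===== SOURCE B (Python) =====
-- def cfb_decrypt(data, key, iv, l=256):
--     # Divide and conquer: each output byte depends only on its immediate
--     # predecessor ciphertext byte, so the sequence can be split anywhere: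
--     # decrypt the left half with iv, the right half seeded by the last
--     # ciphertext byte of the left half (recursion depth O(log n)).
--     data = list(data)
--     n = len(data)
--     if n == 0:
--         return []
--     if n == 1:
--         return [((iv + key) % l) ^ data[0]]
--     mid = n // 2
--     return cfb_decrypt(data[:mid], key, iv, l) + cfb_decrypt(data[mid:], key, data[mid - 1], l)
-- ===== Notes on version B (the rewrite author's own statement) =====
-- stated objective: alternative
-- what changed: Replaces the left-to-right loop that threads a mutable iv through every iteration with a divide-and-conquer recursion that splits the ciphertext in half and decrypts the two halves independently, seeding the right half with the last ciphertext byte of the left half.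
import Mathlib
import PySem

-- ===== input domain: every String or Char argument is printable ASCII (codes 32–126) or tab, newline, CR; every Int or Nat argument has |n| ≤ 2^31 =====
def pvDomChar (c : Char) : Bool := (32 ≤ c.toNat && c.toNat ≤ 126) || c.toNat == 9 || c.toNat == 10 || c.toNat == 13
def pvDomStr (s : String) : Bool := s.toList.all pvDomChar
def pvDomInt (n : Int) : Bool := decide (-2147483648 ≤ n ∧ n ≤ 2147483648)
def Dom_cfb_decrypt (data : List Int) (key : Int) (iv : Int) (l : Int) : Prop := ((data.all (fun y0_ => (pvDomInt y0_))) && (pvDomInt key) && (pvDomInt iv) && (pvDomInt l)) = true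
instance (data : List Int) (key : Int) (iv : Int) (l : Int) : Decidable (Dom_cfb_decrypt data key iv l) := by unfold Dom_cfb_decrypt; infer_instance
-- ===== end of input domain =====

-- B replaces the iv-threading loop with a divide-and-conquer recursion on halves of the ciphertext (return value only).

-- ===== PORT A =====
-- helper 'encrypt(c, key, l) = (c + key) % l'
def pvEncrypt (c : Int) (key : Int) (l : Int) : Int := PySem.Int.mod (c + key) l

def cfb_decrypt (data : List Int) (key : Int) (iv : Int) (l : Int) : List Int :=
  -- loop: for m in data: c = encrypt(iv,key,l); iv = m; c = c ^ iv; append c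
  (data.foldl (fun (st : Int × List Int) m =>
      let c := pvEncrypt st.1 key l
      let iv := m
      let c := PySem.Int.bxor c iv
      (iv, st.2 ++ [c])) (iv, [])).2

-- ===== PORT B =====
def cfb_decrypt_alt (data : List Int) (key : Int) (iv : Int) (l : Int) : List Int :=
  if _h0 : data.length = 0 then []
  else if _h1 : data.length = 1 then
    -- data[0]; the index is always in range here, so .getD 0 is unreachable
    [PySem.Int.bxor (PySem.Int.mod (iv + key) l) ((PySem.List.pyGet? data 0).getD 0)]
  else
    let mid : Nat := data.length / 2          -- n // 2 (n ≥ 2, so floor div = Nat div)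
    -- data[:mid] / data[mid:] / data[mid-1]; the index is always in range, .getD 0 unreachable
    cfb_decrypt_alt (data.take mid) key iv l ++
      cfb_decrypt_alt (data.drop mid) key ((PySem.List.pyGet? data ((mid : Int) - 1)).getD 0) l
termination_by data.length
decreasing_by
  all_goals simp only [List.length_take, List.length_drop]; omega

-- ===== PRECONDITION & SPEC =====
-- Pre_ excludes only l = 0 with nonempty data, where both A and B raise ZeroDivisionError.
def Pre_cfb_decrypt (data : List Int) (key : Int) (iv : Int) (l : Int) : Prop := l ≠ 0 ∨ data = []
instance (data : List Int) (key : Int) (iv : Int) (l : Int) : Decidable (Pre_cfb_decrypt data key iv l) := by unfold Pre_cfb_decrypt; infer_instance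
def pvWitness_cfb_decrypt : List Int × Int × Int × Int := ([5, 9, 2], 3, 7, 256)

def Spec_cfb_decrypt (data : List Int) (key : Int) (iv : Int) (l : Int) (out : List Int) : Prop := out = cfb_decrypt_alt data key iv l
instance (data : List Int) (key : Int) (iv : Int) (l : Int) (out : List Int) : Decidable (Spec_cfb_decrypt data key iv l out) := by unfold Spec_cfb_decrypt; infer_instance

-- ===== CLAIM (what is proved, stated in full; the proofs are below) =====
def Claim_equal_cfb_decrypt : Prop := ∀ (data : List Int) (key : Int) (iv : Int) (l : Int), Dom_cfb_decrypt data key iv l → Pre_cfb_decrypt data key iv l → Spec_cfb_decrypt data key iv l (cfb_decrypt data key iv l)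

-- ===== LEMMAS AND PROOFS =====

-- proof-side reference recursion: the plain one-byte-at-a-time recurrence
def pvGo (key l : Int) : List Int → Int → List Int
  | [], _ => []
  | m :: rest, iv => PySem.Int.bxor (PySem.Int.mod (iv + key) l) m :: pvGo key l rest m

lemma cfb_fold_eq (key l : Int) :
    ∀ (data : List Int) (iv : Int) (acc : List Int),
      (data.foldl (fun (st : Int × List Int) m =>
          let c := pvEncrypt st.1 key l
          let iv := m
          let c := PySem.Int.bxor c iv
          (iv, st.2 ++ [c])) (iv, acc)).2
        = acc ++ pvGo key l data iv := by
  intro data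
  induction data with
  | nil => intro iv acc; simp [pvGo]
  | cons m rest ih =>
    intro iv acc
    have h1 : (((m :: rest).foldl (fun (st : Int × List Int) m =>
          let c := pvEncrypt st.1 key l
          let iv := m
          let c := PySem.Int.bxor c iv
          (iv, st.2 ++ [c])) (iv, acc))).2
        = ((rest.foldl (fun (st : Int × List Int) m =>
          let c := pvEncrypt st.1 key l
          let iv := m
          let c := PySem.Int.bxor c iv
          (iv, st.2 ++ [c])) (m, acc ++ [PySem.Int.bxor (pvEncrypt iv key l) m]))).2 := rfl
    rw [h1, ih m]
    simp [pvGo, pvEncrypt]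

-- pvGo splits at any nonempty prefix, seeding the suffix with the prefix's last element
lemma pvGo_append (key l : Int) :
    ∀ (as bs : List Int) (iv : Int) (h : as ≠ []),
      pvGo key l (as ++ bs) iv = pvGo key l as iv ++ pvGo key l bs (as.getLast h) := by
  intro as
  induction as with
  | nil => intro bs iv h; exact absurd rfl h
  | cons a rest ih =>
    intro bs iv _
    cases rest with
    | nil => simp [pvGo]
    | cons r rs =>
      have h2 := ih bs a (List.cons_ne_nil r rs)
      rw [List.cons_append]
      show PySem.Int.bxor (PySem.Int.mod (iv + key) l) a :: pvGo key l ((r :: rs) ++ bs) a = _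
      rw [h2]
      simp [pvGo]

lemma alt_eq_go (key l : Int) :
    ∀ (n : Nat) (data : List Int), data.length ≤ n → ∀ (iv : Int),
      cfb_decrypt_alt data key iv l = pvGo key l data iv := by
  intro n
  induction n with
  | zero =>
    intro data hlen iv
    have : data = [] := List.eq_nil_of_length_eq_zero (Nat.le_zero.mp hlen)
    subst this
    simp [cfb_decrypt_alt, pvGo]
  | succ k ih =>
    intro data hlen iv
    match data with
    | [] => simp [cfb_decrypt_alt, pvGo]
    | [m] =>
      simp [cfb_decrypt_alt, pvGo, PySem.List.pyGet?, PySem.List.pyIdx?]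
    | m1 :: m2 :: rest =>
      have hne2 : ¬ (m1 :: m2 :: rest).length = 0 ∧ ¬ (m1 :: m2 :: rest).length = 1 := by
        constructor <;> simp
      rw [cfb_decrypt_alt, dif_neg hne2.1, dif_neg hne2.2]
      show cfb_decrypt_alt ((m1 :: m2 :: rest).take ((m1 :: m2 :: rest).length / 2)) key iv l ++
            cfb_decrypt_alt ((m1 :: m2 :: rest).drop ((m1 :: m2 :: rest).length / 2)) key
              ((PySem.List.pyGet? (m1 :: m2 :: rest)
                  ((((m1 :: m2 :: rest).length / 2 : Nat) : Int) - 1)).getD 0) l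
          = pvGo key l (m1 :: m2 :: rest) iv
      have hk : m1 :: m2 :: rest ≠ [] := by simp
      generalize hxs : m1 :: m2 :: rest = xs at *
      have hlen2 : 2 ≤ xs.length := by rw [← hxs]; simp
      generalize hg : xs.length / 2 = mid
      have hmid1 : 1 ≤ mid := by omega
      have hmidlt : mid < xs.length := by omega
      have htk : (xs.take mid).length = mid := by simp; omega
      have htkne : xs.take mid ≠ [] := by
        intro h; rw [h] at htk; simp at htk; omega
      have hidx : (PySem.List.pyGet? xs ((mid : Int) - 1)).getD 0 = (xs.take mid).getLast htkne := by
        have h1 : ((mid : Int) - 1) = ((mid - 1 : Nat) : Int) := by omega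
        rw [h1, PySem.List.pyGet?_natCast]
        have hlt : mid - 1 < xs.length := by omega
        rw [List.getElem?_eq_getElem hlt]
        simp only [Option.getD_some]
        rw [List.getLast_eq_getElem]
        simp [List.getElem_take, htk]
      rw [hidx]
      rw [ih (xs.take mid) (by omega) iv, ih (xs.drop mid) (by simp; omega) _]
      rw [← pvGo_append key l (xs.take mid) (xs.drop mid) iv htkne]
      rw [List.take_append_drop]

-- ===== VERDICT (by name: the statement is the Claim_ definition above) =====
theorem cfb_decrypt_spec : Claim_equal_cfb_decrypt := by
  intro data key iv l _ _
  unfold Spec_cfb_decrypt cfb_decrypt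
  rw [cfb_fold_eq, alt_eq_go key l data.length data (le_refl _) iv]
  simp
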